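-- pv_equiv track=rewrite | github.com/alex-stephens/project-euler | problems 101-200/euler_115.py | F
-- ===== SOURCE A (Python) =====
-- def F(m,n):
--
--     dp = [0 for _ in range(n+1)]
--     dp[:m] = [1] * m
--
--     for i in range(m, n+1):
--
--         dp[i] += dp[i-1] # insert a blank at current position
--
--         for r in range(m, i+1):
--             if i == r:
--                 dp[i] += dp[i-r]    # no need for a black block before
--             else:
--                 dp[i] += dp[i-r-1]  # red block with a black block before
--
--     return dp[n]
-- ===== SOURCE B (Python) =====
-- def F(m, n):
--     dp = [0] * (n + 1)
--     dp[:m] = [1] * m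
--     prefix = 0  # running sum dp[0] + ... + dp[i-m-1]
--     for i in range(m, n + 1):
--         dp[i] = dp[i - 1] + 1 + prefix
--         prefix += dp[i - m]
--     return dp[n]
-- ===== Notes on version B (the rewrite author's own statement) =====
-- stated objective: faster
-- what changed: replaces A's inner summation loop over all admissible red-block lengths by a running prefix sum of the dp table, turning the quadratic double loop into a single linear pass
-- outside the precondition, e.g. on F(0, 0): A returns 0, B returns 1; on F(-1, 5): A raises IndexError, B raises IndexError; on F(2, -3): A raises IndexError, B raises IndexError
import Mathlib
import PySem

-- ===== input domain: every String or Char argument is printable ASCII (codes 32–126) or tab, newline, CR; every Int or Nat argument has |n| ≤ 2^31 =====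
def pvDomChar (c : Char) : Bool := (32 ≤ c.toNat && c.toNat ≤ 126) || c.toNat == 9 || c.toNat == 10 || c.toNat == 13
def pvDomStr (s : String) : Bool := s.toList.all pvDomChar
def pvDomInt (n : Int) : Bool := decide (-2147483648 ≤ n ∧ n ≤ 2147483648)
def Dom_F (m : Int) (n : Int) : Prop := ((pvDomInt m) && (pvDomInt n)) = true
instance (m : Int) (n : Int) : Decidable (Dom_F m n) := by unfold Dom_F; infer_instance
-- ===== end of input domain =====

-- B replaces A's inner summation over red-block lengths by a running prefix sum of dp (quadratic double loop -> single linear pass); return values proved equal on Pre_.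


-- ===== PORT A =====
-- body of A's outer loop: dp[i] += dp[i-1]; then the inner loop over r
def aBody (m : Int) (dp : List Int) (i : Int) : List Int :=
  let dp := PySem.List.pySetD dp i (PySem.List.pyGetD dp i 0 + PySem.List.pyGetD dp (i-1) 0)
  (PySem.List.pyRange m (i+1) 1).foldl (fun dp r =>
    if i = r then
      PySem.List.pySetD dp i (PySem.List.pyGetD dp i 0 + PySem.List.pyGetD dp (i-r) 0)
    else
      PySem.List.pySetD dp i (PySem.List.pyGetD dp i 0 + PySem.List.pyGetD dp (i-r-1) 0)) dp

def F (m : Int) (n : Int) : Int :=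
  let dp := (PySem.List.pyRange 0 (n+1) 1).map (fun _ => (0:Int))
  -- dp[:m] = [1] * m   (slice assignment; exact for 0 ≤ m, and Pre_ gives 1 ≤ m)
  let dp := List.replicate m.toNat (1:Int) ++ dp.drop m.toNat
  let dp := (PySem.List.pyRange m (n+1) 1).foldl (aBody m) dp
  PySem.List.pyGetD dp n 0

-- ===== PORT B =====
-- one iteration of B's single loop, over the state (dp, prefix)
def bStep (m : Int) (st : List Int × Int) (i : Int) : List Int × Int :=
  let dp := PySem.List.pySetD st.1 i (PySem.List.pyGetD st.1 (i-1) 0 + 1 + st.2)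
  (dp, st.2 + PySem.List.pyGetD dp (i-m) 0)

def F_alt (m : Int) (n : Int) : Int :=
  let dp := List.replicate (n+1).toNat (0:Int)
  -- dp[:m] = [1] * m   (slice assignment; exact for 0 ≤ m, and Pre_ gives 1 ≤ m)
  let dp := List.replicate m.toNat (1:Int) ++ dp.drop m.toNat
  let st := (PySem.List.pyRange m (n+1) 1).foldl (bStep m) (dp, 0)
  PySem.List.pyGetD st.1 n 0

-- ===== PRECONDITION & SPEC =====
-- Pre_ excludes m ≤ 0 (A raises IndexError for m < 0; m = 0 posits blocks of minimum
-- length 0, an ill-posed degenerate instance on which no particular value is specified)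
-- and n < -m (there both programs raise IndexError).
def Pre_F (m : Int) (n : Int) : Prop := 1 ≤ m ∧ -m ≤ n
instance (m : Int) (n : Int) : Decidable (Pre_F m n) := by unfold Pre_F; infer_instance
def pvWitness_F : Int × Int := (3, 7)

def Spec_F (m : Int) (n : Int) (out : Int) : Prop := out = F_alt m n
instance (m : Int) (n : Int) (out : Int) : Decidable (Spec_F m n out) := by unfold Spec_F; infer_instance

-- ===== CLAIM (what is proved, stated in full; the proofs are below) =====
def Claim_equal_F : Prop := ∀ (m : Int) (n : Int), Dom_F m n → Pre_F m n → Spec_F m n (F m n)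

-- ===== LEMMAS AND PROOFS =====

-- the mathematical dp value both loops fill in: gdp M j = final dp[j] for minimum block length M
def gdp (M : Nat) (j : Nat) : Int :=
  if j < max M 1 then 1
  else gdp M (j-1) + 1 + ((List.range (j - M)).attach.map (fun t => gdp M t.1)).sum
termination_by j
decreasing_by
  · omega
  · rename_i t; have := t.2; simp only [List.mem_range] at this; omega

theorem gdp_low {M j : Nat} (h : j < max M 1) : gdp M j = 1 := by
  rw [gdp]; simp [h]

theorem gdp_high {M j : Nat} (h : ¬ j < max M 1) :
    gdp M j = gdp M (j-1) + 1 + ((List.range (j - M)).map (gdp M)).sum := by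
  rw [gdp]; simp only [h, if_false]
  congr 1
  simp [List.map_subtype, List.unattach_attach]

-- the dp list once the first k entries carry their final value (length N1)
def Dl (M N1 k : Nat) : List Int :=
  (List.range N1).map (fun j => if j < k then gdp M j else 0)

theorem length_Dl (M N1 k : Nat) : (Dl M N1 k).length = N1 := by
  simp [Dl]

theorem getElem_Dl (M N1 k j : Nat) (hj : j < N1) :
    (Dl M N1 k)[j]'(by simp [length_Dl, hj]) = if j < k then gdp M j else 0 := by
  simp [Dl]

theorem pyGetD_Dl (M N1 k j : Nat) (hj : j < N1) :
    PySem.List.pyGetD (Dl M N1 k) ((j:Int)) 0 = if j < k then gdp M j else 0 := by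
  rw [PySem.List.pyGetD_eq_getElem _ _ (by positivity)
        (by rw [length_Dl]; exact_mod_cast hj)]
  simp only [Int.toNat_natCast]
  exact getElem_Dl M N1 k j hj

theorem pyGetD_set_Dl (M N1 k j : Nat) (x : Int) (hk : k < N1) (hj : j < N1) :
    PySem.List.pyGetD ((Dl M N1 k).set k x) ((j:Int)) 0
      = if j = k then x else if j < k then gdp M j else 0 := by
  rw [PySem.List.pyGetD_eq_getElem _ _ (by positivity)
        (by rw [List.length_set, length_Dl]; exact_mod_cast hj)]
  simp only [Int.toNat_natCast]
  rw [List.getElem_set]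
  by_cases h : k = j
  · simp [h]
  · rw [if_neg h, if_neg (fun hh => h hh.symm), getElem_Dl M N1 k j hj]

theorem set_Dl (M N1 k : Nat) (hk : k < N1) :
    (Dl M N1 k).set k (gdp M k) = Dl M N1 (k+1) := by
  apply List.ext_getElem
  · simp [length_Dl]
  · intro j hj hj'
    have hjN : j < N1 := by simpa [length_Dl] using hj'
    rw [List.getElem_set, getElem_Dl M N1 (k+1) j hjN]
    by_cases h : k = j
    · subst h; simp
    · rw [if_neg h, getElem_Dl M N1 k j hjN]
      by_cases h2 : j < k
      · rw [if_pos h2, if_pos (by omega)]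
      · rw [if_neg h2, if_neg (by omega)]

-- the common initial list (after dp[:m] = [1]*m) is Dl M N1 M
theorem dl_init (M N1 : Nat) (hM : 1 ≤ M) (hMN : M ≤ N1) :
    List.replicate M (1:Int) ++ (List.replicate N1 (0:Int)).drop M = Dl M N1 M := by
  apply List.ext_getElem
  · simp [length_Dl]; omega
  · intro j hj hj'
    have hjN : j < N1 := by simpa [length_Dl] using hj'
    rw [getElem_Dl M N1 M j hjN]
    have hlen : (List.replicate M (1:Int)).length = M := by simp
    by_cases h : j < M
    · rw [List.getElem_append_left (by rw [hlen]; exact h)]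
      rw [List.getElem_replicate, if_pos h, gdp_low (by omega)]
    · rw [List.getElem_append_right (by rw [hlen]; omega)]
      simp [h]

-- A's comprehension [0 for _ in range(n+1)] is a replicate
theorem a_init (n : Int) :
    (PySem.List.pyRange 0 (n+1) 1).map (fun _ => (0:Int)) = List.replicate (n+1).toNat 0 := by
  rw [PySem.List.pyRange_one]
  simp [List.map_map, List.eq_replicate_iff]

theorem list_sum_range_reflect (f : Nat → Int) (d : Nat) :
    ((List.range d).map (fun t => f (d-1-t))).sum = ((List.range d).map f).sum := by
  have h : ∀ g : Nat → Int, ((List.range d).map g).sum = ∑ i ∈ Finset.range d, g i :=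
    fun g => rfl
  rw [h, h, Finset.sum_range_reflect]

-- A's inner loop run over r = M .. M+e-1 (all strictly below i = k): it only reads
-- positions below k, so it adds the e summands dp[k-r-1] to position k
theorem inner_fold (M N1 k : Nat) (hk : k < N1) (hM : 1 ≤ M) :
    ∀ (e : Nat) (x : Int), M + e ≤ k →
      (PySem.List.pyRange (M:Int) ((M:Int)+(e:Int)) 1).foldl
        (fun dp r =>
          if ((k:Nat):Int) = r then
            PySem.List.pySetD dp ((k:Nat):Int) (PySem.List.pyGetD dp ((k:Nat):Int) 0 + PySem.List.pyGetD dp (((k:Nat):Int)-r) 0)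
          else
            PySem.List.pySetD dp ((k:Nat):Int) (PySem.List.pyGetD dp ((k:Nat):Int) 0 + PySem.List.pyGetD dp (((k:Nat):Int)-r-1) 0))
        ((Dl M N1 k).set k x)
      = (Dl M N1 k).set k (x + ((List.range e).map (fun t => gdp M (k - (M+t) - 1))).sum) := by
  intro e
  induction e with
  | zero =>
    intro x _
    rw [PySem.List.pyRange_one_eq_nil (by simp)]
    simp
  | succ e ih =>
    intro x he
    have hsplit : PySem.List.pyRange (M:Int) ((M:Int)+((e+1:Nat):Int)) 1
        = PySem.List.pyRange (M:Int) ((M:Int)+(e:Int)) 1 ++ [((M:Int)+(e:Int))] := by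
      have h2 : (M:Int)+((e+1:Nat):Int) = ((M:Int)+(e:Int))+1 := by push_cast; ring
      rw [h2, PySem.List.pyRange_one_succ_right (a := (M:Int)) (b := (M:Int)+(e:Int)) (by omega)]
    rw [hsplit, List.foldl_append, ih x (by omega)]
    simp only [List.foldl_cons, List.foldl_nil]
    rw [if_neg (by omega)]
    set y := x + ((List.range e).map (fun t => gdp M (k - (M+t) - 1))).sum with hy
    have hidx : ((k:Nat):Int) - ((M:Int)+(e:Int)) - 1 = ((k - (M+e) - 1 : Nat) : Int) := by
      push_cast; omega
    rw [hidx, PySem.List.pySetD_natCast,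
        pyGetD_set_Dl M N1 k k y hk hk,
        pyGetD_set_Dl M N1 k (k-(M+e)-1) y hk (by omega),
        if_pos rfl, if_neg (by omega), if_pos (by omega),
        List.set_set]
    congr 1
    rw [hy, List.range_succ, List.map_append, List.sum_append]
    simp [add_assoc]

-- one outer iteration of A, starting from a consistent table
theorem aBody_Dl (M N1 k : Nat) (hM : 1 ≤ M) (hMk : M ≤ k) (hk : k < N1) :
    aBody (M:Int) (Dl M N1 k) ((k:Nat):Int) = Dl M N1 (k+1) := by
  have hk1 : ((k:Nat):Int) - 1 = ((k-1 : Nat):Int) := by push_cast; omega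
  have hek : ((k:Nat):Int) = (M:Int) + ((k-M : Nat):Int) := by push_cast; omega
  simp only [aBody]
  rw [hk1, PySem.List.pySetD_natCast,
      pyGetD_Dl M N1 k k hk, pyGetD_Dl M N1 k (k-1) (by omega),
      if_neg (by omega), if_pos (by omega)]
  have hsplit : PySem.List.pyRange (M:Int) (((k:Nat):Int)+1) 1
      = PySem.List.pyRange (M:Int) ((M:Int)+((k-M : Nat):Int)) 1 ++ [((k:Nat):Int)] := by
    have h := PySem.List.pyRange_one_succ_right (a := (M:Int)) (b := ((k:Nat):Int)) (by omega)
    rw [h, ← hek]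
  rw [hsplit, List.foldl_append, inner_fold M N1 k hk hM (k-M) _ (by omega)]
  simp only [List.foldl_cons, List.foldl_nil]
  rw [if_pos trivial]
  set y := (0 + gdp M (k-1)) + ((List.range (k-M)).map (fun t => gdp M (k - (M+t) - 1))).sum with hy
  have h0 : ((k:Nat):Int) - ((k:Nat):Int) = ((0:Nat):Int) := by push_cast; ring
  rw [h0, PySem.List.pySetD_natCast,
      pyGetD_set_Dl M N1 k k y hk hk,
      pyGetD_set_Dl M N1 k 0 y hk (by omega),
      if_pos rfl, if_neg (by omega), if_pos (by omega),
      List.set_set]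
  have hsum : ((List.range (k-M)).map (fun t => gdp M (k - (M+t) - 1))).sum
      = ((List.range (k-M)).map (gdp M)).sum := by
    rw [← list_sum_range_reflect (gdp M) (k-M)]
    apply congrArg
    apply List.map_congr_left
    intro t ht
    simp only [List.mem_range] at ht
    congr 1
    omega
  have hgk : gdp M k = gdp M (k-1) + 1 + ((List.range (k-M)).map (gdp M)).sum :=
    gdp_high (by omega)
  have hval : y + gdp M 0 = gdp M k := by
    rw [hy, hsum, hgk, show gdp M 0 = 1 from gdp_low (by omega)]; ring
  rw [hval, set_Dl M N1 k hk]

-- A's whole outer loop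
theorem a_loop (M N1 : Nat) (hM : 1 ≤ M) :
    ∀ d : Nat, M + d ≤ N1 →
      (PySem.List.pyRange (M:Int) ((M:Int)+(d:Int)) 1).foldl (aBody (M:Int)) (Dl M N1 M)
        = Dl M N1 (M+d) := by
  intro d
  induction d with
  | zero =>
    intro _
    rw [PySem.List.pyRange_one_eq_nil (by simp)]
    simp
  | succ d ih =>
    intro hd
    have hsplit : PySem.List.pyRange (M:Int) ((M:Int)+((d+1:Nat):Int)) 1
        = PySem.List.pyRange (M:Int) ((M:Int)+(d:Int)) 1 ++ [((M:Int)+(d:Int))] := by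
      have h2 : (M:Int)+((d+1:Nat):Int) = ((M:Int)+(d:Int))+1 := by push_cast; ring
      rw [h2, PySem.List.pyRange_one_succ_right (a := (M:Int)) (b := (M:Int)+(d:Int)) (by omega)]
    have hi : (M:Int)+(d:Int) = (((M+d : Nat)):Int) := by push_cast; ring
    rw [hsplit, List.foldl_append, ih (by omega)]
    simp only [List.foldl_cons, List.foldl_nil]
    rw [hi, aBody_Dl M N1 (M+d) hM (by omega) (by omega)]
    have h3 : M + (d+1) = M + d + 1 := by omega
    rw [h3]

-- one iteration of B, carrying table and prefix sum
theorem bStep_Dl (M N1 k : Nat) (hM : 1 ≤ M) (hMk : M ≤ k) (hk : k < N1) :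
    bStep (M:Int) (Dl M N1 k, ((List.range (k-M)).map (gdp M)).sum) ((k:Nat):Int)
      = (Dl M N1 (k+1), ((List.range (k-M+1)).map (gdp M)).sum) := by
  have hk1 : ((k:Nat):Int) - 1 = ((k-1 : Nat):Int) := by push_cast; omega
  have hkM : ((k:Nat):Int) - (M:Int) = ((k-M : Nat):Int) := by push_cast; omega
  simp only [bStep]
  rw [hk1, hkM, PySem.List.pySetD_natCast,
      pyGetD_Dl M N1 k (k-1) (by omega), if_pos (by omega)]
  have hgk : gdp M (k-1) + 1 + ((List.range (k-M)).map (gdp M)).sum = gdp M k :=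
    (gdp_high (by omega)).symm
  rw [hgk, set_Dl M N1 k hk,
      pyGetD_Dl M N1 (k+1) (k-M) (by omega), if_pos (by omega)]
  rw [List.range_succ, List.map_append, List.sum_append]
  simp

-- B's whole loop
theorem b_loop (M N1 : Nat) (hM : 1 ≤ M) :
    ∀ d : Nat, M + d ≤ N1 →
      (PySem.List.pyRange (M:Int) ((M:Int)+(d:Int)) 1).foldl (bStep (M:Int)) (Dl M N1 M, 0)
        = (Dl M N1 (M+d), ((List.range d).map (gdp M)).sum) := by
  intro d
  induction d with
  | zero =>
    intro _
    rw [PySem.List.pyRange_one_eq_nil (by simp)]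
    simp
  | succ d ih =>
    intro hd
    have hsplit : PySem.List.pyRange (M:Int) ((M:Int)+((d+1:Nat):Int)) 1
        = PySem.List.pyRange (M:Int) ((M:Int)+(d:Int)) 1 ++ [((M:Int)+(d:Int))] := by
      have h2 : (M:Int)+((d+1:Nat):Int) = ((M:Int)+(d:Int))+1 := by push_cast; ring
      rw [h2, PySem.List.pyRange_one_succ_right (a := (M:Int)) (b := (M:Int)+(d:Int)) (by omega)]
    have hi : (M:Int)+(d:Int) = (((M+d : Nat)):Int) := by push_cast; ring
    rw [hsplit, List.foldl_append, ih (by omega)]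
    simp only [List.foldl_cons, List.foldl_nil]
    have hd' : M + d - M = d := by omega
    have h := bStep_Dl M N1 (M+d) hM (by omega) (by omega)
    rw [hd'] at h
    rw [hi, h]
    have h3 : M + (d+1) = M + d + 1 := by omega
    rw [h3]

-- ===== VERDICT (by name: the statement is the Claim_ definition above) =====
theorem F_spec : Claim_equal_F := by
  intro m n _ hpre
  obtain ⟨hm, hn⟩ := hpre
  unfold Spec_F
  have hm' : m = ((m.toNat : Nat) : Int) := (Int.toNat_of_nonneg (by omega)).symm
  by_cases hcase : n + 1 ≤ m
  · -- n < m : both loops are empty and the initial lists coincide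
    simp only [F, F_alt, a_init, PySem.List.pyRange_one_eq_nil hcase, List.foldl_nil]
  · -- m ≤ n : both loops fill the same table Dl
    set M := m.toNat with hMdef
    set N1 := (n+1).toNat with hN1
    have h1M : 1 ≤ M := by omega
    have hMN : M < N1 := by omega
    have hrange : n + 1 = (M:Int) + ((N1 - M : Nat):Int) := by push_cast; omega
    simp only [F, F_alt, a_init]
    rw [hm']
    simp only [Int.toNat_natCast]
    rw [← hN1, dl_init M N1 h1M (by omega), hrange,
        a_loop M N1 h1M (N1-M) (by omega), b_loop M N1 h1M (N1-M) (by omega)]
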